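-- pv_equiv track=rewrite | github.com/r1cegod/Raven | src/backend/observability/packets.py | format_filter_rollup
-- ===== SOURCE A (Python) =====
-- from typing import Any
--
-- def format_filter_rollup(rows: list[dict[str, Any]]) -> str:
--     if not rows:
--         return "not available"
--     raw_items = sum(int(row.get("raw_items") or 0) for row in rows)
--     unique_video_ids = sum(int(row.get("unique_video_ids") or 0) for row in rows)
--     candidates = sum(int(row.get("candidate_count") or 0) for row in rows)
--     filtered_out = sum(int(row.get("filtered_out") or 0) for row in rows)
--     return (
--         f"`{raw_items}` raw hits, `{unique_video_ids}` unique videos, "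
--         f"`{candidates}` candidates, `{filtered_out}` filtered out"
--     )
-- ===== SOURCE B (Python) =====
-- _FIELDS = (
--     ("raw_items", "raw hits"),
--     ("unique_video_ids", "unique videos"),
--     ("candidate_count", "candidates"),
--     ("filtered_out", "filtered out"),
-- )
--
-- def format_filter_rollup(rows: list[dict[str, object]]) -> str:
--     if not rows:
--         return "not available"
--     totals = {key: 0 for key, _ in _FIELDS}
--     for row in rows:
--         for key, _ in _FIELDS:
--             totals[key] += int(row.get(key) or 0)
--     return ", ".join(f"`{totals[key]}` {label}" for key, label in _FIELDS)
-- ===== Notes on version B (the rewrite author's own statement) =====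
-- stated objective: alternative
-- what changed: Table-driven rewrite: a (key,label) field table drives a dict of running totals accumulated in one pass over rows, and the result string is assembled by joining per-field fragments generated from the same table, instead of A's four hard-coded sum() comprehensions feeding one literal f-string.
import Mathlib
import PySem

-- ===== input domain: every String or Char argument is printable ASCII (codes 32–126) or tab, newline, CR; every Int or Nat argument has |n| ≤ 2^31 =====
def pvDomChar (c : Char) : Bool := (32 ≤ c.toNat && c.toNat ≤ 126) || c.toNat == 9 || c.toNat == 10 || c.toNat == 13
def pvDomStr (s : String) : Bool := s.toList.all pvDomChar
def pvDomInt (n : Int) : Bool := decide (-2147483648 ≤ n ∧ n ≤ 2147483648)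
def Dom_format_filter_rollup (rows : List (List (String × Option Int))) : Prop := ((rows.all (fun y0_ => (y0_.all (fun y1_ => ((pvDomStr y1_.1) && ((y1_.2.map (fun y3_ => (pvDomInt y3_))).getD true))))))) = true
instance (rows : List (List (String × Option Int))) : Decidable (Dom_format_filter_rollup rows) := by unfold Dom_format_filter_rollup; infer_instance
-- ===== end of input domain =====

-- B is a table-driven rewrite: a (key,label) field table drives one dict of running
-- totals accumulated in a single pass over rows, and the output is a join of per-field
-- fragments from the same table (objective: alternative decomposition, same values).

-- ===== PORT A =====
-- int(row.get(k) or 0): missing key or None value → 0, otherwise the int itself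
-- (exact on this domain: values are ints or None; int(v) on an int is v, and 'v or 0' only replaces falsy 0 by 0)
def pvGetOr0 (row : List (String × Option Int)) (k : String) : Int :=
  match (PySem.Dict.mk row).get? k with
  | some (some v) => v
  | _ => 0

def format_filter_rollup (rows : List (List (String × Option Int))) : String :=
  if rows = [] then "not available"
  else
    let raw_items := (rows.map (fun row => pvGetOr0 row "raw_items")).sum
    let unique_video_ids := (rows.map (fun row => pvGetOr0 row "unique_video_ids")).sum
    let candidates := (rows.map (fun row => pvGetOr0 row "candidate_count")).sum
    let filtered_out := (rows.map (fun row => pvGetOr0 row "filtered_out")).sum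
    "`" ++ PySem.Int.toStr raw_items ++ "` raw hits, `" ++ PySem.Int.toStr unique_video_ids
      ++ "` unique videos, `" ++ PySem.Int.toStr candidates ++ "` candidates, `"
      ++ PySem.Int.toStr filtered_out ++ "` filtered out"

-- ===== PORT B =====
def pvFields : List (String × String) :=
  [("raw_items", "raw hits"), ("unique_video_ids", "unique videos"),
   ("candidate_count", "candidates"), ("filtered_out", "filtered out")]

def format_filter_rollup_alt (rows : List (List (String × Option Int))) : String :=
  if rows = [] then "not available"
  else
    -- totals = {key: 0 for key, _ in _FIELDS}
    let totals0 : PySem.Dict String Int :=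
      pvFields.foldl (fun d kl => d.insert kl.1 0) PySem.Dict.empty
    -- for row in rows: for key, _ in _FIELDS: totals[key] += int(row.get(key) or 0)
    -- (the key is always present, so 'totals[key] += x' is modify with default 0)
    let totals := rows.foldl
      (fun d row => pvFields.foldl (fun d kl => d.modify kl.1 0 (· + pvGetOr0 row kl.1)) d)
      totals0
    PySem.Str.join ", "
      (pvFields.map (fun kl => "`" ++ PySem.Int.toStr (totals.getD kl.1 0) ++ "` " ++ kl.2))

-- ===== PRECONDITION & SPEC =====
def Spec_format_filter_rollup (rows : List (List (String × Option Int))) (out : String) : Prop := out = format_filter_rollup_alt rows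
instance (rows : List (List (String × Option Int))) (out : String) : Decidable (Spec_format_filter_rollup rows out) := by unfold Spec_format_filter_rollup; infer_instance

-- ===== CLAIM =====
def Claim_equal_format_filter_rollup : Prop := ∀ (rows : List (List (String × Option Int))), Dom_format_filter_rollup rows → Spec_format_filter_rollup rows (format_filter_rollup rows)

-- ===== LEMMAS AND PROOFS =====
-- effect of one row's inner field loop on one of the four totals
theorem pvInner_getD (d : PySem.Dict String Int) (row : List (String × Option Int))
    (kk : String) (hk : kk ∈ ["raw_items", "unique_video_ids", "candidate_count", "filtered_out"]) :
    (([("raw_items", "raw hits"), ("unique_video_ids", "unique videos"),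
       ("candidate_count", "candidates"), ("filtered_out", "filtered out")] : List (String × String)).foldl (fun d kl => d.modify kl.1 0 (· + pvGetOr0 row kl.1)) d).getD kk 0
      = d.getD kk 0 + pvGetOr0 row kk := by
  simp at hk ⊢
  rcases hk with h | h | h | h <;> subst h <;>
    simp [PySem.Dict.getD_modify]

-- the outer fold accumulates, per field key, the sum of that field over rows
theorem pvFold_getD (rows : List (List (String × Option Int)))
    (d : PySem.Dict String Int) (kk : String)
    (hk : kk ∈ ["raw_items", "unique_video_ids", "candidate_count", "filtered_out"]) :
    (rows.foldl
        (fun d row => ([("raw_items", "raw hits"), ("unique_video_ids", "unique videos"),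
       ("candidate_count", "candidates"), ("filtered_out", "filtered out")] : List (String × String)).foldl (fun d kl => d.modify kl.1 0 (· + pvGetOr0 row kl.1)) d)
        d).getD kk 0
      = d.getD kk 0 + (rows.map (fun row => pvGetOr0 row kk)).sum := by
  induction rows generalizing d with
  | nil => simp
  | cons r rs ih =>
    rw [List.foldl_cons, ih, pvInner_getD _ _ _ hk, List.map_cons, List.sum_cons]
    ring

-- ===== VERDICT =====
theorem format_filter_rollup_spec : Claim_equal_format_filter_rollup := by
  intro rows _
  unfold Spec_format_filter_rollup format_filter_rollup format_filter_rollup_alt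
  by_cases h : rows = []
  · simp [h]
  · simp only [h]
    simp only [pvFields, List.map_cons, List.map_nil]
    rw [pvFold_getD rows _ "raw_items" (by simp),
        pvFold_getD rows _ "unique_video_ids" (by simp),
        pvFold_getD rows _ "candidate_count" (by simp),
        pvFold_getD rows _ "filtered_out" (by simp)]
    simp [PySem.Str.join, PySem.Dict.getD_insert_self, PySem.Dict.getD_insert_of_ne]
    rw [← String.toList_inj]
    simp [PySem.Chars.join, List.intercalate]
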